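-- pv_equiv track=rewrite | github.com/SophieVromans/RAIChU | raichu/visualize_cluster.py | sort_domains
-- ===== SOURCE A (Python) =====
-- def sort_domains(unsorted_list_domains):
--     """
--
--     """
--     sorted_list_domains = []
--     order = ['DH', 'ER', 'KR', 'KR*', 'KR_inactive', 'KR_A1', 'KR_A2', 'KR_B1',
--              'KR_B2', 'KR_C1', 'KR_C2']
--     for domain in order:
--         if domain in unsorted_list_domains:
--             sorted_list_domains.append(domain)
--
--     return sorted_list_domains
-- ===== SOURCE B (Python) =====
-- _ORDER = ['DH', 'ER', 'KR', 'KR*', 'KR_inactive', 'KR_A1', 'KR_A2', 'KR_B1',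
--           'KR_B2', 'KR_C1', 'KR_C2']
-- _RANK = {name: i for i, name in enumerate(_ORDER)}
--
--
-- def sort_domains(unsorted_list_domains):
--     present = set(unsorted_list_domains) & set(_ORDER)
--     return sorted(present, key=_RANK.__getitem__)
-- ===== Notes on version B (the rewrite author's own statement) =====
-- stated objective: idiomatic
-- what changed: Replaced the scan over the priority list with per-element list-membership tests by a set intersection of the input with the priority list followed by a sort keyed on a precomputed rank dictionary (hashing removes the repeated linear membership scans).
import Mathlib
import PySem

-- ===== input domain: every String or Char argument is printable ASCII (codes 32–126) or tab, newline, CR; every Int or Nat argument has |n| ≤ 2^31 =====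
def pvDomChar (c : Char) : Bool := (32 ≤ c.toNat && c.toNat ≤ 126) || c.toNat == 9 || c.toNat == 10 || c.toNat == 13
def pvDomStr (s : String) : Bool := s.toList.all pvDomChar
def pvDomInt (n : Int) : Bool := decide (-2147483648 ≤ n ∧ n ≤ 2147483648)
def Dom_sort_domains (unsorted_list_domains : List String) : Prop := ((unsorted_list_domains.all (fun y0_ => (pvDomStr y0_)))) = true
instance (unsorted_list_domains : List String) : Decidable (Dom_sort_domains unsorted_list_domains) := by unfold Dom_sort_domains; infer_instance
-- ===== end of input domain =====

-- B replaces A's scan over the priority list by a set intersection sorted with a rank-dictionary key (idiomatic; same result).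

-- ===== PORT A =====
-- the literal 'order' list from A
def pvOrderA : List String :=
  ["DH", "ER", "KR", "KR*", "KR_inactive", "KR_A1", "KR_A2", "KR_B1", "KR_B2", "KR_C1", "KR_C2"]

def sort_domains (unsorted_list_domains : List String) : List String :=
  pvOrderA.foldl
    (fun sorted_list_domains domain =>
      if unsorted_list_domains.contains domain then sorted_list_domains ++ [domain]
      else sorted_list_domains) []

-- ===== PORT B =====
def pvOrderB : List String :=
  ["DH", "ER", "KR", "KR*", "KR_inactive", "KR_A1", "KR_A2", "KR_B1", "KR_B2", "KR_C1", "KR_C2"]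

-- _RANK = {name: i for i, name in enumerate(_ORDER)}
def pvRankB : PySem.Dict String Int :=
  (PySem.List.enumerate pvOrderB 0).foldl (fun d p => d.insert p.2 p.1) PySem.Dict.empty

-- key=_RANK.__getitem__; every element of the intersection is a key of _RANK, so the
-- total getD form is exact on all inputs reaching it (KeyError unreachable)
def sort_domains_alt (unsorted_list_domains : List String) : List String :=
  PySem.List.sorted
    (PySem.Set.inter (PySem.Set.ofList unsorted_list_domains) (PySem.Set.ofList pvOrderB))
    (fun x => pvRankB.getD x 0) false

-- ===== PRECONDITION & SPEC =====
def Spec_sort_domains (unsorted_list_domains : List String) (out : List String) : Prop := out = sort_domains_alt unsorted_list_domains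
instance (unsorted_list_domains : List String) (out : List String) : Decidable (Spec_sort_domains unsorted_list_domains out) := by unfold Spec_sort_domains; infer_instance

-- ===== CLAIM (what is proved, stated in full; the proofs are below) =====
def Claim_equal_sort_domains : Prop := ∀ (unsorted_list_domains : List String), Dom_sort_domains unsorted_list_domains → Spec_sort_domains unsorted_list_domains (sort_domains unsorted_list_domains)

-- ===== LEMMAS AND PROOFS =====

-- A is a filter of the priority list
theorem sort_domains_eq_filter (l : List String) :
    sort_domains l = pvOrderA.filter (fun d => l.contains d) := by
  unfold sort_domains
  simpa using PySem.List.foldl_append_if_eq_filter (l := pvOrderA)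
    (p := fun d => l.contains d) (acc := [])

-- the priority list has strictly increasing ranks
theorem pvOrder_pairwise : pvOrderA.Pairwise (fun a b => pvRankB.getD a 0 < pvRankB.getD b 0) := by
  decide

theorem pvOrder_nodup : pvOrderA.Nodup := by decide

theorem sort_domains_spec' (l : List String) : sort_domains l = sort_domains_alt l := by
  rw [sort_domains_eq_filter]
  unfold sort_domains_alt
  refine Eq.symm ?_
  apply PySem.List.sorted_eq_of_perm_of_pairwise_lt
  · -- the filter is a permutation of the intersection set
    refine (List.perm_ext_iff_of_nodup ?_ ?_).mpr ?_
    · exact pvOrder_nodup.filter _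
    · exact PySem.Set.nodup_inter _ _ (PySem.Set.nodup_ofList l)
    · intro x
      simp only [List.mem_filter, PySem.Set.mem_inter, PySem.Set.mem_ofList,
        List.contains_iff_mem, List.mem_filter]
      unfold pvOrderA pvOrderB
      tauto
  · exact pvOrder_pairwise.filter _

-- ===== VERDICT (by name: the statement is the Claim_ definition above) =====
theorem sort_domains_spec : Claim_equal_sort_domains := by
  intro l _
  exact sort_domains_spec' l
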